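-- pv_equiv track=rewrite | github.com/Deepthi-Vemula/scaler-python | 5-hashing/homework.py | perms2
-- ===== SOURCE A (Python) =====
-- def checkFrequencies(B, A):
--     for i in range(len(B)):
--         if B[i] != A[i]:
--             return False
--     return True
--
-- def perms2(A, B):
--     lenB = len(B)
--     lenA = len(A)
--     letterFreqA = [0 for i in range(26)]
--     letterFreqB = [0 for i in range(26)]
--     offsetVal = ord("a")
--     if lenA > lenB or lenB == 0 or lenA == 0:
--         return 0
--     for i in range(lenA):
--         letterFreqA[ord(A[i]) - offsetVal] += 1
--         if i < lenA-1:
--             letterFreqB[ord(B[i]) - offsetVal] += 1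
--     count = 0
--     for i in range(lenA-1, lenB):
--         letterFreqB[ord(B[i]) - offsetVal] += 1
--         # check for frequencies match
--         if checkFrequencies(letterFreqB, letterFreqA):
--             count += 1
--         # print ("val to be deleted : ", i-lenA+1, B[i-lenA+1])
--         letterFreqB[ord(B[i-lenA+1]) - offsetVal] -= 1
--     return count
-- ===== SOURCE B (Python) =====
-- def perms2(A, B):
--     lenA, lenB = len(A), len(B)
--     if lenA > lenB or lenB == 0 or lenA == 0:
--         return 0
--     freqA = [0] * 26
--     for c in A:
--         freqA[ord(c) - ord("a")] += 1
--     count = 0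
--     for i in range(lenB - lenA + 1):
--         freqW = [0] * 26
--         for c in B[i:i + lenA]:
--             freqW[ord(c) - ord("a")] += 1
--         if freqW == freqA:
--             count += 1
--     return count
-- ===== Notes on version B (the rewrite author's own statement) =====
-- stated objective: simpler
-- what changed: Replaces the incremental sliding-window frequency update (maintain one array, add the entering char, compare via an element-by-element helper, remove the leaving char) by independent per-window recomputation: each window's 26-bucket frequency array is rebuilt from scratch and compared to A's array with plain list equality.
import Mathlib
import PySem

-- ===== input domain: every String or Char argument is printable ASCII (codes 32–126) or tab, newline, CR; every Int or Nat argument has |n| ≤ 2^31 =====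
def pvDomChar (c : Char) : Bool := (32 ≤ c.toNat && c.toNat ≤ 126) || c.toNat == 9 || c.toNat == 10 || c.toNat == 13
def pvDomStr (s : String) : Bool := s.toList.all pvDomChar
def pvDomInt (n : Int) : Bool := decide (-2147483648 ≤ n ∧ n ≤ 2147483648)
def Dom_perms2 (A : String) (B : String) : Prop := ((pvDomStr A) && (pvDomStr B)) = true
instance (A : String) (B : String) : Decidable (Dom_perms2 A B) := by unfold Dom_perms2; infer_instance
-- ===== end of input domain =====

-- B replaces A's incremental sliding-window update by independent per-window recomputation
-- of the 26-bucket frequency array, compared with plain list equality (objective: simpler).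

-- shared primitive, the port of the statement `l[idx] += d` that both Pythons contain:
-- Python negative indices wrap (idx + len); exact for -l.length ≤ idx < l.length
-- (Pre_perms2 excludes the characters for which Python raises IndexError here).
def bump (l : List Int) (idx : Int) (d : Int) : List Int :=
  l.modify (if idx < 0 then idx + l.length else idx).toNat (· + d)

-- ord(c) - ord("a")
def bucketI (c : Char) : Int := (c.toNat : Int) - 97

-- ===== PORT A =====
-- early-return scan `for i in range(len(B)): if B[i] != A[i]: return False` = all;
-- getD is exact: i < len(B) and the callers always pass two lists of length 26.
def checkFrequencies (Bf : List Int) (Af : List Int) : Bool :=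
  (List.range Bf.length).all (fun i => Bf.getD i 0 == Af.getD i 0)

def perms2 (A : String) (B : String) : Int :=
  let al := A.toList
  let bl := B.toList
  let lenB := bl.length
  let lenA := al.length
  let letterFreqA := List.replicate 26 (0 : Int)
  let letterFreqB := List.replicate 26 (0 : Int)
  if lenA > lenB ∨ lenB = 0 ∨ lenA = 0 then 0
  else
    -- for i in range(lenA): update letterFreqA; if i < lenA-1: update letterFreqB
    -- (A[i], B[i] via getD: indices are in range here)
    let p := (List.range lenA).foldl
      (fun (p : List Int × List Int) i =>
        (bump p.1 (bucketI (al.getD i ' ')) 1,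
         if i < lenA - 1 then bump p.2 (bucketI (bl.getD i ' ')) 1 else p.2))
      (letterFreqA, letterFreqB)
    -- for i in range(lenA-1, lenB): exact as range' since 0 ≤ lenA-1 ≤ lenB here;
    -- i-lenA+1 written i+1-lenA (equal in ℤ; exact in ℕ since i ≥ lenA-1)
    let st := (List.range' (lenA - 1) (lenB - (lenA - 1))).foldl
      (fun (st : List Int × Int) i =>
        let fb := bump st.1 (bucketI (bl.getD i ' ')) 1
        let cnt := if checkFrequencies fb p.1 then st.2 + 1 else st.2
        (bump fb (bucketI (bl.getD (i + 1 - lenA) ' ')) (-1), cnt))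
      (p.2, (0 : Int))
    st.2

-- ===== PORT B =====
def perms2_alt (A : String) (B : String) : Int :=
  let al := A.toList
  let bl := B.toList
  let lenA := al.length
  let lenB := bl.length
  if lenA > lenB ∨ lenB = 0 ∨ lenA = 0 then 0
  else
    let freqA := al.foldl (fun l c => bump l (bucketI c) 1) (List.replicate 26 (0 : Int))
    -- for i in range(lenB-lenA+1): recompute the window's array from B[i:i+lenA]
    -- (the slice is (drop i).take lenA: exact since 0 ≤ i ≤ i+lenA)
    (List.range (lenB - lenA + 1)).foldl
      (fun (count : Int) i =>
        let freqW := ((bl.drop i).take lenA).foldl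
          (fun l c => bump l (bucketI c) 1) (List.replicate 26 (0 : Int))
        if freqW == freqA then count + 1 else count)
      (0 : Int)

-- ===== PRECONDITION & SPEC =====
-- Pre_ excludes exactly the inputs where Python A raises IndexError: when the length guard
-- does not fire, every character of A and B is indexed into the 26-list, which raises
-- unless ord(c)-97 ∈ [-26, 25], i.e. 71 ≤ ord(c) ≤ 122 ('G'..'z'). B raises there too.
def Pre_perms2 (A : String) (B : String) : Prop :=
  (B.toList.length < A.toList.length ∨ B.toList = [] ∨ A.toList = []) ∨
  ((A.toList.all (fun c => 71 ≤ c.toNat && c.toNat ≤ 122)) = true ∧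
   (B.toList.all (fun c => 71 ≤ c.toNat && c.toNat ≤ 122)) = true)
instance (A : String) (B : String) : Decidable (Pre_perms2 A B) := by
  unfold Pre_perms2; infer_instance

def pvWitness_perms2 : String × String := ("ab", "abab")

def Spec_perms2 (A : String) (B : String) (out : Int) : Prop := out = perms2_alt A B
instance (A : String) (B : String) (out : Int) : Decidable (Spec_perms2 A B out) := by
  unfold Spec_perms2; infer_instance

-- ===== CLAIM (what is proved, stated in full; the proofs are below) =====
def Claim_equal_perms2 : Prop := ∀ (A : String) (B : String), Dom_perms2 A B → Pre_perms2 A B → Spec_perms2 A B (perms2 A B)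

-- ===== LEMMAS AND PROOFS =====

-- bucket actually hit in the 26-list after Python's negative-index wrap
def bk (c : Char) : Nat := (if bucketI c < 0 then bucketI c + 26 else bucketI c).toNat

-- multiplicity of bucket k among the characters of l
def cntB (l : List Char) (k : Nat) : Int := (l.countP (fun c => bk c == k) : Int)

def inR (c : Char) : Prop := 71 ≤ c.toNat ∧ c.toNat ≤ 122

theorem bk_lt (c : Char) (h : inR c) : bk c < 26 := by
  rcases h with ⟨h1, h2⟩
  simp only [bk, bucketI]
  split <;> omega

theorem rep26_getD (k : Nat) : (List.replicate 26 (0 : Int)).getD k 0 = 0 := by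
  simp only [List.getD_eq_getElem?_getD, List.getElem?_replicate]
  split <;> rfl

theorem bump_length (l : List Int) (i d : Int) : (bump l i d).length = l.length := by
  simp [bump]

theorem bump_getD (l : List Int) (hl : l.length = 26) (c : Char) (hc : inR c) (d : Int)
    (k : Nat) (hk : k < 26) :
    (bump l (bucketI c) d).getD k 0 = l.getD k 0 + (if bk c = k then d else 0) := by
  have hidx : (if bucketI c < 0 then bucketI c + (l.length : Int) else bucketI c).toNat = bk c := by
    rw [hl]; rfl
  have hbk : bk c < 26 := bk_lt c hc
  simp only [bump, hidx, List.getD_eq_getElem?_getD, List.getElem?_modify]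
  rcases Nat.lt_or_ge k l.length with hkl | hkl
  · rw [List.getElem?_eq_getElem hkl]
    by_cases h : bk c = k <;> simp [h]
  · omega

theorem cntB_cons (c : Char) (t : List Char) (k : Nat) :
    cntB (c :: t) k = cntB t k + (if bk c = k then 1 else 0) := by
  simp only [cntB, List.countP_cons]
  by_cases h : bk c = k <;> simp [h]

theorem cntB_snoc (t : List Char) (c : Char) (k : Nat) :
    cntB (t ++ [c]) k = cntB t k + (if bk c = k then 1 else 0) := by
  simp only [cntB, List.countP_append, List.countP_cons, List.countP_nil]
  by_cases h : bk c = k <;> simp [h]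

theorem foldl_bump_length (l : List Char) (arr : List Int) :
    (l.foldl (fun a c => bump a (bucketI c) 1) arr).length = arr.length := by
  induction l generalizing arr with
  | nil => rfl
  | cons c t ih => simp [List.foldl_cons, ih, bump_length]

theorem foldl_bump_getD (l : List Char) (h : ∀ c ∈ l, inR c) (arr : List Int)
    (ha : arr.length = 26) (k : Nat) (hk : k < 26) :
    (l.foldl (fun a c => bump a (bucketI c) 1) arr).getD k 0 = arr.getD k 0 + cntB l k := by
  induction l generalizing arr with
  | nil => simp [cntB]
  | cons c t ih =>
    have hc : inR c := h c (List.mem_cons_self ..)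
    have ht : ∀ x ∈ t, inR x := fun x hx => h x (List.mem_cons_of_mem _ hx)
    have ha' : (bump arr (bucketI c) 1).length = 26 := by rw [bump_length, ha]
    simp only [List.foldl_cons]
    rw [ih ht _ ha', bump_getD arr ha c hc 1 k hk, cntB_cons]
    ring

-- index-driven fold over range(len l) with l.getD = fold over the characters of l
theorem foldl_range_getD {α : Type} (l : List Char) (g : α → Char → α) (a : α) :
    (List.range l.length).foldl (fun x i => g x (l.getD i ' ')) a = l.foldl g a := by
  have hmap : (List.range l.length).map (fun i => l.getD i ' ') = l := by
    apply List.ext_getElem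
    · simp
    · intro i h1 h2
      simp only [List.getElem_map, List.getElem_range]
      exact List.getD_eq_getElem l ' ' h2
  rw [← List.foldl_map (f := fun i => l.getD i ' ') (g := g)]
  rw [hmap]

theorem window_snoc (bl : List Char) (j m : Nat) (hm : 1 ≤ m) (hjm : j + m ≤ bl.length) :
    (bl.drop j).take m = (bl.drop j).take (m - 1) ++ [bl.getD (j + (m - 1)) ' '] := by
  cases m with
  | zero => omega
  | succ m' =>
    have h1 : j + m' < bl.length := by omega
    have h2 : m' < (bl.drop j).length := by simp only [List.length_drop]; omega
    simp only [Nat.add_sub_cancel]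
    rw [List.take_add_one, List.getElem?_eq_getElem h2]
    simp only [Option.toList_some]
    rw [List.getElem_drop, List.getD_eq_getElem _ _ h1]

theorem window_cons (bl : List Char) (j m : Nat) (hm : 1 ≤ m) (hjm : j + m ≤ bl.length) :
    (bl.drop j).take m = bl.getD j ' ' :: (bl.drop (j + 1)).take (m - 1) := by
  have h1 : j < bl.length := by omega
  have hd : bl.drop j = bl[j] :: bl.drop (j + 1) := List.drop_eq_getElem_cons h1
  cases m with
  | zero => omega
  | succ m' =>
    rw [List.getD_eq_getElem _ _ h1, hd]
    simp only [Nat.add_sub_cancel, List.take_succ_cons]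

-- the element-by-element helper applied to two pointwise-equal length-26 arrays
-- agrees with list equality against any third length-26 array
theorem check_eq (fb fw fa : List Int) (h26b : fb.length = 26) (h26w : fw.length = 26)
    (h26a : fa.length = 26) (hpt : ∀ k, k < 26 → fb.getD k 0 = fw.getD k 0) :
    checkFrequencies fb fa = (fw == fa) := by
  have hfb : fb = fw := by
    apply List.ext_getElem (by omega)
    intro i hi1 hi2
    have := hpt i (by omega)
    rwa [List.getD_eq_getElem _ _ hi1, List.getD_eq_getElem _ _ hi2] at this
  subst hfb
  rw [Bool.eq_iff_iff]
  simp only [checkFrequencies, List.all_eq_true, List.mem_range, beq_iff_eq, h26b]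
  constructor
  · intro h
    apply List.ext_getElem (by omega)
    intro i hi1 hi2
    have := h i (by omega)
    rwa [List.getD_eq_getElem _ _ hi1, List.getD_eq_getElem _ _ hi2] at this
  · intro h i hi
    rw [h]

-- main sliding invariant: A's remaining loop produces the same counter as B's
theorem slide (bl : List Char) (m : Nat) (fa : List Int)
    (hB : ∀ c ∈ bl, inR c) (hm : 1 ≤ m) (h26a : fa.length = 26) :
    ∀ (len j : Nat) (fb : List Int) (c : Int),
    j + (m - 1) + len = bl.length →
    fb.length = 26 →
    (∀ k, k < 26 → fb.getD k 0 = cntB ((bl.drop j).take (m - 1)) k) →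
    ((List.range' (j + (m - 1)) len).foldl
      (fun (st : List Int × Int) i =>
        let fbx := bump st.1 (bucketI (bl.getD i ' ')) 1
        let cnt := if checkFrequencies fbx fa then st.2 + 1 else st.2
        (bump fbx (bucketI (bl.getD (i + 1 - m) ' ')) (-1), cnt))
      (fb, c)).2
    = (List.range' j len).foldl
      (fun (count : Int) i =>
        let freqW := ((bl.drop i).take m).foldl
          (fun l ch => bump l (bucketI ch) 1) (List.replicate 26 (0 : Int))
        if freqW == fa then count + 1 else count) c := by
  intro len
  induction len with
  | zero => intro j fb c _ _ _; rfl
  | succ len ih =>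
    intro j fb c hlen h26 hpt
    rw [List.range'_succ, List.range'_succ]
    simp only [List.foldl_cons]
    have hjm : j + m ≤ bl.length := by omega
    have hwin : ∀ x ∈ (bl.drop j).take m, inR x := fun x hx =>
      hB x (List.mem_of_mem_drop (List.mem_of_mem_take hx))
    -- the entering character
    have hi1 : j + (m - 1) < bl.length := by omega
    have hec : inR (bl.getD (j + (m - 1)) ' ') := by
      rw [List.getD_eq_getElem _ _ hi1]; exact hB _ (List.getElem_mem hi1)
    -- after adding it, fb is pointwise the full window's frequency array
    have h26' : (bump fb (bucketI (bl.getD (j + (m - 1)) ' ')) 1).length = 26 := by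
      rw [bump_length, h26]
    have hpt' : ∀ k, k < 26 →
        (bump fb (bucketI (bl.getD (j + (m - 1)) ' ')) 1).getD k 0
          = cntB ((bl.drop j).take m) k := by
      intro k hk
      rw [bump_getD fb h26 _ hec 1 k hk, hpt k hk,
          window_snoc bl j m hm hjm, cntB_snoc]
    -- B's freshly recomputed window array: length 26 and the same pointwise values
    have h26w : (((bl.drop j).take m).foldl (fun l ch => bump l (bucketI ch) 1)
        (List.replicate 26 (0 : Int))).length = 26 := by
      rw [foldl_bump_length]; simp
    have hptw : ∀ k, k < 26 →
        (((bl.drop j).take m).foldl (fun l ch => bump l (bucketI ch) 1)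
          (List.replicate 26 (0 : Int))).getD k 0 = cntB ((bl.drop j).take m) k := by
      intro k hk
      rw [foldl_bump_getD _ hwin _ (by simp) k hk, rep26_getD]
      ring
    -- the two branch conditions coincide
    have hcond : checkFrequencies (bump fb (bucketI (bl.getD (j + (m - 1)) ' ')) 1) fa
        = ((((bl.drop j).take m).foldl (fun l ch => bump l (bucketI ch) 1)
            (List.replicate 26 (0 : Int))) == fa) := by
      apply check_eq _ _ _ h26' h26w h26a
      intro k hk
      rw [hpt' k hk, hptw k hk]
    -- the removed (leaving) character is B[j]
    have hidx : j + (m - 1) + 1 - m = j := by omega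
    have hlc : inR (bl.getD j ' ') := by
      have hj : j < bl.length := by omega
      rw [List.getD_eq_getElem _ _ hj]; exact hB _ (List.getElem_mem hj)
    -- state after the removal: the next (m-1)-prefix window
    have hnext : ∀ k, k < 26 →
        (bump (bump fb (bucketI (bl.getD (j + (m - 1)) ' ')) 1)
          (bucketI (bl.getD (j + (m - 1) + 1 - m) ' ')) (-1)).getD k 0
        = cntB ((bl.drop (j + 1)).take (m - 1)) k := by
      intro k hk
      rw [hidx, bump_getD _ h26' _ hlc (-1) k hk, hpt' k hk,
          window_cons bl j m hm hjm, cntB_cons]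
      generalize bl.getD j ' ' = x
      by_cases h : bk x = k <;> simp [h]
    simp only [hcond]
    rw [show List.range' (j + (m - 1) + 1) len = List.range' ((j + 1) + (m - 1)) len from by
      rw [show j + (m - 1) + 1 = (j + 1) + (m - 1) from by omega]]
    exact ih (j + 1)
      (bump (bump fb (bucketI (bl.getD (j + (m - 1)) ' ')) 1)
        (bucketI (bl.getD (j + (m - 1) + 1 - m) ' ')) (-1))
      _ (by omega) (by rw [bump_length, h26']) hnext

-- ===== VERDICT (by name: the statement is the Claim_ definition above) =====
theorem perms2_spec : Claim_equal_perms2 := by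
  intro A B _hdom hpre
  unfold Spec_perms2 perms2 perms2_alt
  set al := A.toList with hal
  set bl := B.toList with hbl
  unfold Pre_perms2 at hpre
  rw [← hal, ← hbl] at hpre
  by_cases hguard : al.length > bl.length ∨ bl.length = 0 ∨ al.length = 0
  · rw [if_pos hguard, if_pos (by tauto)]
  · rw [if_neg hguard, if_neg (by tauto)]
    push_neg at hguard
    obtain ⟨hg1, hg2, hg3⟩ := hguard
    have hm : 1 ≤ al.length := by omega
    have hmn : al.length ≤ bl.length := by omega
    have hrange : (∀ c ∈ al, inR c) ∧ (∀ c ∈ bl, inR c) := by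
      rcases hpre with (h | h | h) | h
      · omega
      · exact absurd (by simp [h]) hg2
      · exact absurd (by simp [h]) hg3
      · simp only [List.all_eq_true, Bool.and_eq_true, decide_eq_true_eq] at h
        exact ⟨fun c hc => ⟨(h.1 c hc).1, (h.1 c hc).2⟩, fun c hc => ⟨(h.2 c hc).1, (h.2 c hc).2⟩⟩
    obtain ⟨hA, hB⟩ := hrange
    set m := al.length with hm'
    set n := bl.length with hn'
    -- A's first loop splits componentwise
    rw [PySem.List.foldl_prod_mk
      (fun a i => bump a (bucketI (al.getD i ' ')) 1)
      (fun b i => if i < m - 1 then bump b (bucketI (bl.getD i ' ')) 1 else b)]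
    -- fa-component: index fold = char fold = B's freqA
    have hfa : (List.range m).foldl (fun a i => bump a (bucketI (al.getD i ' ')) 1)
        (List.replicate 26 (0 : Int))
        = al.foldl (fun l c => bump l (bucketI c) 1) (List.replicate 26 (0 : Int)) := by
      rw [hm']; exact foldl_range_getD al (fun l c => bump l (bucketI c) 1) (List.replicate 26 (0 : Int))
    -- fb-component equals the frequency fold over B's first m-1 characters
    have hfb : (List.range m).foldl
        (fun b i => if i < m - 1 then bump b (bucketI (bl.getD i ' ')) 1 else b)
        (List.replicate 26 (0 : Int))
        = (bl.take (m - 1)).foldl (fun l c => bump l (bucketI c) 1)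
            (List.replicate 26 (0 : Int)) := by
      have hr : List.range m = List.range (m - 1) ++ [m - 1] := by
        conv_lhs => rw [show m = (m - 1) + 1 from by omega]
        rw [List.range_succ]
      rw [hr, List.foldl_append]
      simp only [List.foldl_cons, List.foldl_nil, if_neg (lt_irrefl (m - 1))]
      rw [PySem.List.foldl_congr_mem (List.range (m - 1)) _
        (fun b i => bump b (bucketI (bl.getD i ' ')) 1) _
        (fun acc x hx => by rw [if_pos (List.mem_range.mp hx)])]
      have hlen : (bl.take (m - 1)).length = m - 1 := by
        rw [List.length_take]; omega
      rw [← foldl_range_getD (bl.take (m - 1)) (fun l c => bump l (bucketI c) 1)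
        (List.replicate 26 (0 : Int)), hlen]
      apply PySem.List.foldl_congr_mem
      intro acc i hi
      have hi' : i < m - 1 := List.mem_range.mp hi
      have h1 : i < bl.length := by omega
      have h2 : i < (bl.take (m - 1)).length := by omega
      rw [List.getD_eq_getElem _ _ h1, List.getD_eq_getElem _ _ h2, List.getElem_take]
    rw [hfa, hfb]
    -- the sliding loop against B's per-window recomputation
    have hinit26 : ((bl.take (m - 1)).foldl (fun l c => bump l (bucketI c) 1)
        (List.replicate 26 (0 : Int))).length = 26 := by
      rw [foldl_bump_length]; simp
    have hinitpt : ∀ k, k < 26 →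
        ((bl.take (m - 1)).foldl (fun l c => bump l (bucketI c) 1)
          (List.replicate 26 (0 : Int))).getD k 0
        = cntB ((bl.drop 0).take (m - 1)) k := by
      intro k hk
      rw [foldl_bump_getD _ (fun c hc => hB c (List.mem_of_mem_take hc)) _ (by simp) k hk,
        rep26_getD, List.drop_zero]
      ring
    have h26a : (al.foldl (fun l c => bump l (bucketI c) 1)
        (List.replicate 26 (0 : Int))).length = 26 := by
      rw [foldl_bump_length]; simp
    have hkey := slide bl m
      (al.foldl (fun l c => bump l (bucketI c) 1) (List.replicate 26 (0 : Int)))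
      hB hm h26a (n - (m - 1)) 0
      ((bl.take (m - 1)).foldl (fun l c => bump l (bucketI c) 1)
        (List.replicate 26 (0 : Int)))
      0 (by omega) hinit26 hinitpt
    simp only [Nat.zero_add] at hkey
    rw [hkey]
    have hcnt : n - (m - 1) = n - m + 1 := by omega
    rw [hcnt, ← List.range_eq_range']
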